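-- pv_equiv track=rewrite | github.com/komaksym/biggitybiggityO | src/scraping/leetcode_solutions/solutions/minimum-operations-to-make-the-array-k-increasing.py | kIncreasing
-- ===== SOURCE A (Python) =====
-- import bisect
--
-- def kIncreasing(arr, k):
--
--     def longest_non_decreasing_subsequence(arr):
--         result = []
--         for x in arr:
--             right = bisect.bisect_right(result, x)
--             if right == len(result):
--                 result.append(x)
--             else:
--                 result[right] = x
--         return len(result)
--
--     return len(arr) - sum(longest_non_decreasing_subsequence((arr[j] for j in range(i, len(arr), k))) for i in range(k))
-- ===== SOURCE B (Python) =====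
-- def kIncreasing(arr, k):
--     n = len(arr)
--     total = 0
--     for i in range(k):
--         sub = arr[i::k]
--         pairs = []  # (value, length of the longest non-decreasing subsequence of sub ending at it)
--         for x in sub:
--             best = 1
--             for v, d in pairs:
--                 if v <= x and d + 1 > best:
--                     best = d + 1
--             pairs.append((x, best))
--         longest = 0
--         for _, d in pairs:
--             longest = max(longest, d)
--         total += longest
--     return n - total
-- ===== Notes on version B (the rewrite author's own statement) =====
-- stated objective: alternative
-- what changed: The per-stride longest-non-decreasing-subsequence length is computed by a quadratic scanning DP over (value, best-length-ending-here) pairs with a final running max, instead of A's patience-sorting tails array maintained with bisect_right; strides are taken with step slicing arr[i::k] and totals accumulated in a loop.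
import Mathlib
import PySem

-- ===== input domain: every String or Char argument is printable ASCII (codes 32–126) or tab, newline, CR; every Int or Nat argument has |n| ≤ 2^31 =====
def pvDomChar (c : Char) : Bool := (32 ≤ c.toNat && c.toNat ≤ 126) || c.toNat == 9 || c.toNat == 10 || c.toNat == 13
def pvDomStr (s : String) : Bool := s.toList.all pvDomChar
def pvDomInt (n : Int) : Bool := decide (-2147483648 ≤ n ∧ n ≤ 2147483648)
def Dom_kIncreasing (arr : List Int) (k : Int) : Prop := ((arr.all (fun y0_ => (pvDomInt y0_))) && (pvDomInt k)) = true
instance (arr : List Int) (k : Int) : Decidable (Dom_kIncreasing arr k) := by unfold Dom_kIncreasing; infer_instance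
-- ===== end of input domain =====

-- B replaces A's patience-sorting (bisect_right) longest-non-decreasing-subsequence routine by a
-- quadratic scanning DP over (value, best-length) pairs; same result, alternative algorithm (not faster).

-- ===== PORT A =====
-- one iteration of A's inner `for x in arr` loop; `bisect.bisect_right` is PySem.List.bisectRight
def pvPatStep (result : List Int) (x : Int) : List Int :=
  let right := PySem.List.bisectRight result x
  if right = result.length then result ++ [x] else result.set right x

-- A's `longest_non_decreasing_subsequence`
def pvLndsPat (arr : List Int) : Int :=
  ((arr.foldl pvPatStep []).length : Int)

-- the generator `(arr[j] for j in range(i, len(arr), k))`; every produced j satisfies 0 ≤ i ≤ j < len(arr),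
-- so `arr[j]` never raises and pyGetD with any default is exact here
def pvStride (arr : List Int) (i k : Int) : List Int :=
  (PySem.List.pyRange i (arr.length) k).map (fun j => PySem.List.pyGetD arr j 0)

def kIncreasing (arr : List Int) (k : Int) : Int :=
  (arr.length : Int) - ((PySem.List.pyRange 0 k 1).map (fun i => pvLndsPat (pvStride arr i k))).sum

-- ===== PORT B =====
-- B's innermost loop: best = 1; for (v, d) in pairs: if v <= x and d + 1 > best: best = d + 1
def pvBest (pairs : List (Int × Int)) (x : Int) : Int :=
  pairs.foldl (fun best p => if p.1 ≤ x ∧ p.2 + 1 > best then p.2 + 1 else best) 1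

-- one iteration of B's `for x in sub` loop: pairs.append((x, best))
def pvDpStep (pairs : List (Int × Int)) (x : Int) : List (Int × Int) :=
  pairs ++ [(x, pvBest pairs x)]

-- `sub = arr[i::k]`: for 0 ≤ i and 0 < k (the only way B reaches it, since i ∈ range(k)) the step-slice
-- is exactly [arr[j] for j in range(i, len(arr), k)], ported as below (exact there; PySem.slice has no step)
def pvStrideB (arr : List Int) (i k : Int) : List Int :=
  (PySem.List.pyRange i (arr.length) k).map (fun j => PySem.List.pyGetD arr j 0)

-- B's per-stride DP: build pairs, then `longest = 0; for _, d in pairs: longest = max(longest, d)`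
def pvLndsDp (sub : List Int) : Int :=
  let pairs := sub.foldl pvDpStep []
  pairs.foldl (fun longest p => max longest p.2) 0

def kIncreasing_alt (arr : List Int) (k : Int) : Int :=
  (arr.length : Int) -
    (PySem.List.pyRange 0 k 1).foldl (fun total i => total + pvLndsDp (pvStrideB arr i k)) 0

-- ===== PRECONDITION & SPEC =====
def Spec_kIncreasing (arr : List Int) (k : Int) (out : Int) : Prop := out = kIncreasing_alt arr k
instance (arr : List Int) (k : Int) (out : Int) : Decidable (Spec_kIncreasing arr k out) := by unfold Spec_kIncreasing; infer_instance

-- ===== CLAIM (what is proved, stated in full; the proofs are below) =====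
def Claim_equal_kIncreasing : Prop := ∀ (arr : List Int) (k : Int), Dom_kIncreasing arr k → Spec_kIncreasing arr k (kIncreasing arr k)

-- ===== LEMMAS AND PROOFS =====

-- candidates at level j : the values in `pairs` whose dp-length exceeds j
def pvCand (pairs : List (Int × Int)) (j : Nat) : List Int :=
  (pairs.filter (fun p => decide ((j : Int) < p.2))).map Prod.fst

-- the coupling invariant between B's dp state and A's patience tails:
-- tails[j] is the minimum over values carrying a dp-length > j (and exists iff such a value exists)
def pvInv (pairs : List (Int × Int)) (tails : List Int) : Prop :=
  (∀ p ∈ pairs, 1 ≤ p.2) ∧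
  ∀ j : Nat, PySem.List.min? (pvCand pairs j) (fun v => v) = tails[j]?

lemma pvMem_cand {pairs : List (Int × Int)} {j : Nat} {v : Int} :
    v ∈ pvCand pairs j ↔ ∃ p ∈ pairs, (j : Int) < p.2 ∧ p.1 = v := by
  simp [pvCand, List.mem_map, List.mem_filter, and_comm]

lemma pvmin_append_singleton (l : List Int) (x : Int) :
    PySem.List.min? (l ++ [x]) (fun v => v) =
      some (match PySem.List.min? l (fun v => v) with | none => x | some v => min v x) := by
  cases l with
  | nil => rfl
  | cons a t =>
    rw [List.cons_append, PySem.List.min?_id_cons, PySem.List.min?_id_cons, List.foldl_append]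
    simp

lemma pvBest_fold_spec (pairs : List (Int × Int)) (x : Int) : ∀ (b0 : Int),
    b0 ≤ pairs.foldl (fun best p => if p.1 ≤ x ∧ p.2 + 1 > best then p.2 + 1 else best) b0 ∧
    (∀ p ∈ pairs, p.1 ≤ x → p.2 + 1 ≤ pairs.foldl (fun best p => if p.1 ≤ x ∧ p.2 + 1 > best then p.2 + 1 else best) b0) ∧
    (pairs.foldl (fun best p => if p.1 ≤ x ∧ p.2 + 1 > best then p.2 + 1 else best) b0 = b0 ∨
      ∃ p ∈ pairs, p.1 ≤ x ∧ pairs.foldl (fun best p => if p.1 ≤ x ∧ p.2 + 1 > best then p.2 + 1 else best) b0 = p.2 + 1) := by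
  induction pairs with
  | nil => intro b0; simp
  | cons q t ih =>
    intro b0
    simp only [List.foldl_cons]
    by_cases hq : q.1 ≤ x ∧ q.2 + 1 > b0
    · simp only [if_pos hq]
      obtain ⟨h1, h2, h3⟩ := ih (q.2 + 1)
      refine ⟨by omega, ?_, ?_⟩
      · intro p hp hpx
        rcases List.mem_cons.1 hp with rfl | hp
        · exact h1
        · exact h2 p hp hpx
      · rcases h3 with h | ⟨p, hp, hpx, he⟩
        · exact Or.inr ⟨q, List.mem_cons_self .., hq.1, h⟩
        · exact Or.inr ⟨p, List.mem_cons_of_mem _ hp, hpx, he⟩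
    · simp only [if_neg hq]
      obtain ⟨h1, h2, h3⟩ := ih b0
      refine ⟨h1, ?_, ?_⟩
      · intro p hp hpx
        rcases List.mem_cons.1 hp with rfl | hp
        · by_cases hb : p.2 + 1 > b0
          · exact absurd ⟨hpx, hb⟩ hq
          · omega
        · exact h2 p hp hpx
      · rcases h3 with h | ⟨p, hp, hpx, he⟩
        · exact Or.inl h
        · exact Or.inr ⟨p, List.mem_cons_of_mem _ hp, hpx, he⟩

lemma pvTails_sorted {pairs : List (Int × Int)} {tails : List Int}
    (h : pvInv pairs tails) : List.Pairwise (fun a b : Int => a ≤ b) tails := by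
  rw [List.pairwise_iff_getElem]
  intro a b ha hb hab
  have hma : PySem.List.min? (pvCand pairs a) (fun v => v) = some tails[a] := by
    rw [h.2 a, List.getElem?_eq_getElem ha]
  have hmb : PySem.List.min? (pvCand pairs b) (fun v => v) = some tails[b] := by
    rw [h.2 b, List.getElem?_eq_getElem hb]
  have hmem : tails[b] ∈ pvCand pairs a := by
    have := PySem.List.min?_mem hmb
    rw [pvMem_cand] at this ⊢
    obtain ⟨p, hp, hlt, he⟩ := this
    exact ⟨p, hp, by omega, he⟩
  exact PySem.List.min?_isMin hma _ hmem

lemma pvInv_step (x : Int) {pairs : List (Int × Int)} {tails : List Int}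
    (h : pvInv pairs tails) : pvInv (pvDpStep pairs x) (pvPatStep tails x) := by
  obtain ⟨hpos, hmin⟩ := h
  set r := PySem.List.bisectRight tails x with hr
  obtain ⟨hrle, hlow, hhigh⟩ := PySem.List.bisectRight_spec tails x (pvTails_sorted ⟨hpos, hmin⟩)
  obtain ⟨hb1, hb2, hb3⟩ := pvBest_fold_spec pairs x 1
  -- key step: pvBest pairs x = r + 1
  have hkey : pvBest pairs x = (r : Int) + 1 := by
    have hble : pvBest pairs x ≤ (r : Int) + 1 := by
      rcases hb3 with heq | ⟨p, hp, hpx, he⟩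
      · have hbe : pvBest pairs x = 1 := heq
        omega
      · -- p.2 ≤ r: otherwise p.1 is a candidate at level r, forcing tails[r] ≤ x
        by_contra hc
        have hrp : (r : Int) < p.2 := by
          have hce : pvBest pairs x = p.2 + 1 := he
          omega
        have hmem : p.1 ∈ pvCand pairs r := pvMem_cand.2 ⟨p, hp, hrp, rfl⟩
        have hne : pvCand pairs r ≠ [] := fun he' => by simp [he'] at hmem
        obtain ⟨m, hm⟩ : ∃ m, PySem.List.min? (pvCand pairs r) (fun v => v) = some m := by
          cases hmm : PySem.List.min? (pvCand pairs r) (fun v => v) with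
          | none => exact absurd ((PySem.List.min?_eq_none_iff _ _).1 hmm) hne
          | some m => exact ⟨m, rfl⟩
        have hrl : r < tails.length := by
          by_contra hcl
          rw [hmin r, List.getElem?_eq_none (by omega)] at hm
          simp at hm
        have hmt : m = tails[r] := by
          rw [hmin r, List.getElem?_eq_getElem hrl] at hm
          exact (Option.some.inj hm).symm
        have hlex : tails[r] ≤ x :=
          hmt ▸ le_trans (PySem.List.min?_isMin hm _ hmem) hpx
        exact absurd hlex (not_le.2 (hhigh r hrl le_rfl))
    have hgle : (r : Int) + 1 ≤ pvBest pairs x := by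
      rcases Nat.eq_zero_or_pos r with h0 | hposr
      · have hb1' : (1 : Int) ≤ pvBest pairs x := hb1
        omega
      · have hjl : r - 1 < tails.length := by omega
        have hm : PySem.List.min? (pvCand pairs (r - 1)) (fun v => v) = some tails[r - 1] := by
          rw [hmin (r - 1), List.getElem?_eq_getElem hjl]
        obtain ⟨p, hp, hlt, he⟩ := pvMem_cand.1 (PySem.List.min?_mem hm)
        have hplex : p.1 ≤ x := he ▸ hlow (r - 1) hjl (by omega)
        have hbp : p.2 + 1 ≤ pvBest pairs x := hb2 p hp hplex
        omega
    omega
  constructor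
  · intro p hp
    rcases List.mem_append.1 hp with hp | hp
    · exact hpos p hp
    · simp only [List.mem_singleton] at hp
      rw [hp]
      show 1 ≤ pvBest pairs x
      omega
  · intro j
    have hcand : pvCand (pvDpStep pairs x) j =
        pvCand pairs j ++ (if (j : Int) < pvBest pairs x then [x] else []) := by
      simp only [pvDpStep, pvCand, List.filter_append, List.map_append]
      congr 1
      by_cases hjb : (j : Int) < pvBest pairs x
      · simp [hjb]
      · simp [hjb]
    rw [hcand, hkey]
    simp only [pvPatStep, ← hr]
    by_cases hjr : j < r
    · -- j < r : x is a new candidate but tails[j] ≤ x keeps the minimum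
      have hjl : j < tails.length := by omega
      rw [if_pos (by omega : (j : Int) < (r : Int) + 1), pvmin_append_singleton,
        hmin j, List.getElem?_eq_getElem hjl]
      simp only [min_eq_left (hlow j hjl hjr)]
      by_cases hre : r = tails.length
      · rw [if_pos hre, List.getElem?_append_left hjl, List.getElem?_eq_getElem hjl]
      · rw [if_neg hre, List.getElem?_set, if_neg (by omega), List.getElem?_eq_getElem hjl]
    · by_cases hje : j = r
      · -- j = r : the appended pair is the unique new candidate and x the new minimum
        subst hje
        rw [if_pos (by omega : (r : Int) < (r : Int) + 1), pvmin_append_singleton, hmin r]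
        by_cases hre : r = tails.length
        · rw [List.getElem?_eq_none (by omega), if_pos hre, hre, List.getElem?_concat_length]
        · have hjl : r < tails.length := by omega
          rw [List.getElem?_eq_getElem hjl, if_neg hre, List.getElem?_set, if_pos rfl,
            if_pos hjl]
          simp only [min_eq_right (le_of_lt (hhigh r hjl le_rfl))]
      · -- j > r : the new dp-length r + 1 ≤ j adds no candidate; nothing changes
        rw [if_neg (by omega : ¬ (j : Int) < (r : Int) + 1), List.append_nil, hmin j]
        by_cases hre : r = tails.length
        · rw [if_pos hre, List.getElem?_eq_none (by omega),
            List.getElem?_eq_none (by simp; omega)]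
        · rw [if_neg hre, List.getElem?_set, if_neg (by omega)]

lemma pvFoldl_max_le (l : List (Int × Int)) : ∀ (a c : Int), a ≤ c → (∀ p ∈ l, p.2 ≤ c) →
    l.foldl (fun longest p => max longest p.2) a ≤ c := by
  induction l with
  | nil => intro a c h _; simpa using h
  | cons q t ih =>
    intro a c h hall
    simp only [List.foldl_cons]
    exact ih _ _ (max_le h (hall q (List.mem_cons_self ..))) fun p hp =>
      hall p (List.mem_cons_of_mem _ hp)

lemma pvInv_foldl (xs : List Int) : ∀ pairs tails, pvInv pairs tails →
    pvInv (xs.foldl pvDpStep pairs) (xs.foldl pvPatStep tails) := by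
  induction xs with
  | nil => intro _ _ h; exact h
  | cons x t ih => intro pairs tails h; exact ih _ _ (pvInv_step x h)

lemma pvLnds_eq (xs : List Int) : pvLndsPat xs = pvLndsDp xs := by
  obtain ⟨hpos, hmin⟩ : pvInv (xs.foldl pvDpStep []) (xs.foldl pvPatStep []) := by
    refine pvInv_foldl xs [] [] ⟨by simp, fun j => ?_⟩
    simp [pvCand, PySem.List.min?]
  set pairs := xs.foldl pvDpStep [] with hpdef
  set tails := xs.foldl pvPatStep [] with htdef
  rw [pvLndsPat, pvLndsDp, ← hpdef, ← htdef]
  have hub : ∀ p ∈ pairs, p.2 ≤ (tails.length : Int) := by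
    intro p hp
    by_contra hc
    have hmem : p.1 ∈ pvCand pairs tails.length := pvMem_cand.2 ⟨p, hp, by omega, rfl⟩
    have hnone : PySem.List.min? (pvCand pairs tails.length) (fun v => v) = none := by
      rw [hmin, List.getElem?_eq_none le_rfl]
    rw [(PySem.List.min?_eq_none_iff _ _).1 hnone] at hmem
    simp at hmem
  have hle : pairs.foldl (fun longest p => max longest p.2) 0 ≤ (tails.length : Int) :=
    pvFoldl_max_le pairs 0 _ (by positivity) hub
  have hge : (tails.length : Int) ≤ pairs.foldl (fun longest p => max longest p.2) 0 := by
    rcases Nat.eq_zero_or_pos tails.length with h0 | hposl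
    · rw [h0]
      exact_mod_cast (PySem.List.le_foldl_max_int pairs Prod.snd 0).1
    · have hjl : tails.length - 1 < tails.length := by omega
      have hm : PySem.List.min? (pvCand pairs (tails.length - 1)) (fun v => v) =
          some tails[tails.length - 1] := by
        rw [hmin, List.getElem?_eq_getElem hjl]
      obtain ⟨p, hp, hlt, he⟩ := pvMem_cand.1 (PySem.List.min?_mem hm)
      have hfb := (PySem.List.le_foldl_max_int pairs Prod.snd 0).2 p hp
      omega
  omega

-- ===== VERDICT (by name: the statement is the Claim_ definition above) =====
theorem kIncreasing_spec : Claim_equal_kIncreasing := by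
  intro arr k _
  unfold Spec_kIncreasing kIncreasing kIncreasing_alt
  rw [PySem.List.foldl_add (g := fun i => pvLndsDp (pvStrideB arr i k))]
  simp [pvLnds_eq, pvStride, pvStrideB]
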